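-- pv_equiv track=rewrite | github.com/inputforge/pixelbot | src/pixelbot/ui/alignment.py | align_stretch
-- ===== SOURCE A (Python) =====
-- def align_stretch(
--     axis_size: int, children_sizes: list[int], spacing: int
-- ) -> list[tuple[int, int]]:
--     n = len(children_sizes)
--     delta = axis_size // n - spacing
--     result = []
--     x = 0
--     for _ in children_sizes:
--         result.append((x, x + delta))
--         x += delta + spacing
--     return result
-- ===== SOURCE B (Python) =====
-- def align_stretch(axis_size, children_sizes, spacing):
--     n = len(children_sizes)
--     step = axis_size // n          # = delta + spacing: the pitch between successive starts
--     delta = step - spacing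
--     return [(i * step, i * step + delta) for i in range(n)]
-- ===== Notes on version B (the rewrite author's own statement) =====
-- stated objective: alternative
-- what changed: Replaces the loop-carried running accumulator x with a closed-form per-index computation: each slot's start is i*(axis_size//n), built by a comprehension over range(n).
import Mathlib
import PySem

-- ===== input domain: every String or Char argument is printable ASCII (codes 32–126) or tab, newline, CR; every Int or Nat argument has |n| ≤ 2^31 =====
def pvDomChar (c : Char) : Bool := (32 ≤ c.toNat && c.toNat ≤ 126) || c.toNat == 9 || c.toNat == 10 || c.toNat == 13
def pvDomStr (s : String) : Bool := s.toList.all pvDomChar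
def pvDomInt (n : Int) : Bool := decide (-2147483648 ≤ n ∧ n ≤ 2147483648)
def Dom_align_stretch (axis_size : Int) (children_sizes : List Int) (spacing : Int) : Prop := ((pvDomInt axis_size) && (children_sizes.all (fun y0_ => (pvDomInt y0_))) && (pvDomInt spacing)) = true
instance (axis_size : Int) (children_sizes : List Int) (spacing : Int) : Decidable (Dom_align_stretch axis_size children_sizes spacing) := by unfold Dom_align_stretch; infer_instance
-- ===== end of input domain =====

-- B removes A's loop-carried accumulator: each slot is computed in closed form from its index.
-- ===== PORT A =====
def align_stretch (axis_size : Int) (children_sizes : List Int) (spacing : Int) : List (Int × Int) :=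
  let n : Int := children_sizes.length
  let delta : Int := PySem.Int.floordiv axis_size n - spacing
  let st := children_sizes.foldl
    (fun (st : List (Int × Int) × Int) _ =>
      (st.1 ++ [(st.2, st.2 + delta)], st.2 + delta + spacing))
    ([], 0)
  st.1

-- ===== PORT B =====
def align_stretch_alt (axis_size : Int) (children_sizes : List Int) (spacing : Int) : List (Int × Int) :=
  let n := children_sizes.length
  let step : Int := PySem.Int.floordiv axis_size (n : Int)
  let delta : Int := step - spacing
  (List.range n).map (fun (i : Nat) => ((i : Int) * step, (i : Int) * step + delta))

-- ===== PRECONDITION & SPEC =====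
-- Pre_ excludes the empty list, on which Python A raises ZeroDivisionError (and B does too).
def Pre_align_stretch (axis_size : Int) (children_sizes : List Int) (spacing : Int) : Prop :=
  children_sizes ≠ []
instance (axis_size : Int) (children_sizes : List Int) (spacing : Int) : Decidable (Pre_align_stretch axis_size children_sizes spacing) := by unfold Pre_align_stretch; infer_instance
def pvWitness_align_stretch : Int × List Int × Int := (10, [3, 4], 1)
def Spec_align_stretch (axis_size : Int) (children_sizes : List Int) (spacing : Int) (out : List (Int × Int)) : Prop := out = align_stretch_alt axis_size children_sizes spacing
instance (axis_size : Int) (children_sizes : List Int) (spacing : Int) (out : List (Int × Int)) : Decidable (Spec_align_stretch axis_size children_sizes spacing out) := by unfold Spec_align_stretch; infer_instance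

-- ===== CLAIM (what is proved, stated in full; the proofs are below) =====
def Claim_equal_align_stretch : Prop := ∀ (axis_size : Int) (children_sizes : List Int) (spacing : Int), Dom_align_stretch axis_size children_sizes spacing → Pre_align_stretch axis_size children_sizes spacing → Spec_align_stretch axis_size children_sizes spacing (align_stretch axis_size children_sizes spacing)

-- ===== LEMMAS AND PROOFS =====

-- Loop invariant: A's fold starting at accumulator (acc, x) appends, for index i,
-- the pair (x + i*(delta+spacing), x + i*(delta+spacing) + delta).
theorem align_stretch_fold_closed (delta spacing : Int) :
    ∀ (cs : List Int) (acc : List (Int × Int)) (x : Int),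
      (cs.foldl
        (fun (st : List (Int × Int) × Int) _ =>
          (st.1 ++ [(st.2, st.2 + delta)], st.2 + delta + spacing))
        (acc, x)).1 =
      acc ++ (List.range cs.length).map
        (fun (i : Nat) => (x + (i : Int) * (delta + spacing), x + (i : Int) * (delta + spacing) + delta)) := by
  intro cs
  induction cs with
  | nil => intro acc x; simp
  | cons c cs ih =>
      intro acc x
      rw [List.foldl_cons, ih]
      simp only [List.length_cons, List.range_succ_eq_map, List.map_cons, List.map_map,
        List.append_assoc, List.singleton_append, Nat.cast_zero]
      congr 2
      · simp only [Prod.mk.injEq]; constructor <;> ring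
      apply List.map_congr_left
      intro i _
      simp only [Function.comp_apply, Prod.mk.injEq]
      push_cast
      constructor <;> ring

-- ===== VERDICT (by name: the statement is the Claim_ definition above) =====
theorem align_stretch_spec : Claim_equal_align_stretch := by
  intro axis_size cs spacing _ _
  unfold Spec_align_stretch align_stretch align_stretch_alt
  rw [align_stretch_fold_closed]
  simp only [List.nil_append]
  apply List.map_congr_left
  intro i _
  simp only [Prod.mk.injEq]
  constructor <;> ring
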